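-- pv_equiv track=rewrite | github.com/zhangheihei/starrocks | build-support/check_be_module_boundaries.py | _strip_cmake_comment
-- ===== SOURCE A (Python) =====
-- def _strip_cmake_comment(line: str) -> str:
--     quote_open = False
--     for index, char in enumerate(line):
--         if char == '"':
--             quote_open = not quote_open
--         if char == "#" and not quote_open:
--             return line[:index]
--     return line
-- ===== SOURCE B (Python) =====
-- def _strip_cmake_comment(line: str) -> str:
--     parts = line.split('#')
--     result = parts[0]
--     quote_open = result.count('"') % 2 == 1
--     for part in parts[1:]:
--         if not quote_open:
--             return result
--         result += '#' + part
--         quote_open ^= part.count('"') % 2 == 1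
--     return line
-- ===== Notes on version B (the rewrite author's own statement) =====
-- stated objective: faster
-- what changed: B splits the line on the comment character once and folds over the resulting segments with per-segment quote-counting, instead of A's character-by-character scan with a per-character quote toggle.
import Mathlib
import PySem

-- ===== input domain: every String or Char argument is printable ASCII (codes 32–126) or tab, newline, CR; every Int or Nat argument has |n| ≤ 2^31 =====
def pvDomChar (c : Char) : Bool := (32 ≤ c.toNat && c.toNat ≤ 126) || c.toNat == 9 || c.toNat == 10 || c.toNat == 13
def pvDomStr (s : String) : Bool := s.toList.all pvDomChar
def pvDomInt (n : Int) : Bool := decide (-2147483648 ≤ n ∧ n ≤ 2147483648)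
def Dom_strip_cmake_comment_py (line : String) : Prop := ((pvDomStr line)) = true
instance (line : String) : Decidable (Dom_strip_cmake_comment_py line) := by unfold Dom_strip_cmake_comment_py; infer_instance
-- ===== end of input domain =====

-- B replaces A's character-by-character scan by splitting the line on '#' and folding over the
-- '#'-delimited segments with per-segment quote parity (objective: alternative decomposition).

-- ===== PORT A =====
-- literal port of A: enumerate(line) with quote_open state; line[:index] is a slice.
def stripCmakeCommentGoA (line : String) : List Char → Nat → Bool → String
  | [], _, _ => line
  | c :: cs, index, quote_open =>
      let quote_open' := if c = '"' then !quote_open else quote_open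
      if c == '#' && !quote_open' then
        String.mk (PySem.List.slice line.toList none (some (index : Int)))  -- line[:index]
      else stripCmakeCommentGoA line cs (index + 1) quote_open'

def strip_cmake_comment_py (line : String) : String :=
  stripCmakeCommentGoA line line.toList 0 false

-- ===== PORT B =====
-- literal port of Source B's loop over parts[1:]: result/quote_open accumulator.
def stripCmakeCommentGoB (line : String) : List Char → Bool → List (List Char) → String
  | result, quote_open, [] => line                      -- loop finished: return line
  | result, quote_open, part :: ps =>
      if quote_open = false then String.mk result
      else stripCmakeCommentGoB line (result ++ '#' :: part)
             (quote_open ^^ (PySem.Chars.count part ['"'] % 2 == 1)) ps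

def strip_cmake_comment_py_alt (line : String) : String :=
  match PySem.Chars.splitOn line.toList ['#'] with   -- line.split('#')
  | [] => line                                       -- unreachable: split never returns []
  | part0 :: rest =>
      stripCmakeCommentGoB line part0 (PySem.Chars.count part0 ['"'] % 2 == 1) rest

-- ===== PRECONDITION & SPEC =====
def Spec_strip_cmake_comment_py (line : String) (out : String) : Prop := out = strip_cmake_comment_py_alt line
instance (line : String) (out : String) : Decidable (Spec_strip_cmake_comment_py line out) := by unfold Spec_strip_cmake_comment_py; infer_instance

-- ===== CLAIM (what is proved, stated in full; the proofs are below) =====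
def Claim_equal_strip_cmake_comment_py : Prop := ∀ (line : String), Dom_strip_cmake_comment_py line → Spec_strip_cmake_comment_py line (strip_cmake_comment_py line)

-- ===== LEMMAS AND PROOFS =====

/-- Mathematical core of A: `some p` = the prefix before the first unquoted `'#'`, `none` = no cut. -/
def stripACore (q : Bool) : List Char → Option (List Char)
  | [] => none
  | c :: cs =>
      let q' := if c = '"' then !q else q
      if c == '#' && !q' then some []
      else (stripACore q' cs).map (c :: ·)

lemma count_go_quote (l : List Char) : ∀ (fuel acc : Nat), l.length ≤ fuel →
    PySem.Chars.count.go ['"'] fuel l acc = acc + l.count '"' := by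
  induction l with
  | nil => intro fuel acc h; cases fuel <;> simp [PySem.Chars.count.go]
  | cons c cs ih =>
      intro fuel acc h
      cases fuel with
      | zero => simp at h
      | succ f =>
          rw [PySem.Chars.count.go]
          simp only [List.length_cons] at h
          by_cases hc : c = '"'
          · subst hc
            simp only [List.isPrefixOf, List.isPrefixOf_nil_left, beq_self_eq_true, Bool.and_true,
              List.length_singleton, List.drop_succ_cons, List.drop_zero, if_pos]
            rw [ih f (acc + 1) (by omega)]
            simp [List.count_cons]
            omega
          · have hne : ('"' == c) = false := by simp [Ne.symm hc]
            simp only [List.isPrefixOf, hne, Bool.false_and, Bool.false_eq_true, if_false]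
            rw [ih f acc (by omega)]
            simp [List.count_cons, hc]

/-- `Chars.count` with the one-character needle `['"']` is `List.count '"'`. -/
lemma count_quote (l : List Char) : PySem.Chars.count l ['"'] = l.count '"' := by
  simp [PySem.Chars.count, count_go_quote l l.length 0 le_rfl]

/-- Structural single-character split on `'#'`. -/
def splitH : List Char → List (List Char)
  | [] => [[]]
  | c :: cs =>
      if c = '#' then [] :: splitH cs
      else
        match splitH cs with
        | p :: ps => (c :: p) :: ps
        | [] => [[c]]

lemma splitH_ne_nil (l : List Char) : splitH l ≠ [] := by
  cases l with
  | nil => simp [splitH]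
  | cons c cs =>
      simp only [splitH]
      split
      · simp
      · split <;> simp

lemma splitOn_go_hash (l : List Char) : ∀ (fuel : Nat) (cur : List Char) (acc : List (List Char)),
    l.length < fuel →
    PySem.Chars.splitOn.go ['#'] fuel l cur acc =
      acc.reverse ++ (match splitH l with
                      | p :: ps => (cur.reverse ++ p) :: ps
                      | [] => []) := by
  induction l with
  | nil =>
      intro fuel cur acc h
      cases fuel with
      | zero => simp at h
      | succ f => rw [PySem.Chars.splitOn.go] <;> simp [splitH]
  | cons c cs ih =>
      intro fuel cur acc h
      cases fuel with
      | zero => simp at h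
      | succ f =>
          rw [PySem.Chars.splitOn.go]
          simp only [List.length_cons] at h
          by_cases hc : c = '#'
          · subst hc
            simp only [List.isPrefixOf, beq_self_eq_true, Bool.and_true, List.isPrefixOf_nil_left,
              List.length_singleton, List.drop_succ_cons, List.drop_zero, if_pos]
            rw [ih f [] (cur.reverse :: acc) (by omega)]
            cases hs : splitH cs with
            | nil => exact absurd hs (splitH_ne_nil cs)
            | cons p ps => simp [splitH, hs]
          · have hne : ('#' == c) = false := by simp [Ne.symm hc]
            simp only [List.isPrefixOf, hne, Bool.false_and, Bool.false_eq_true, if_false]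
            rw [ih f (c :: cur) acc (by omega)]
            cases hs : splitH cs with
            | nil => exact absurd hs (splitH_ne_nil cs)
            | cons p ps => simp [splitH, hs, hc]

/-- `Chars.splitOn` with separator `['#']` is the structural split. -/
lemma splitOn_hash (l : List Char) : PySem.Chars.splitOn l ['#'] = splitH l := by
  rw [PySem.Chars.splitOn, splitOn_go_hash l (l.length + 1) [] [] (by omega)]
  cases h : splitH l with
  | nil => exact absurd h (splitH_ne_nil l)
  | cons p ps => simp

/-- A's loop equals `stripACore` plus the already-consumed prefix. -/
lemma goA_eq_core (line : String) (l : List Char) : ∀ (pre : List Char) (q : Bool),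
    line.toList = pre ++ l →
    stripCmakeCommentGoA line l pre.length q =
      match stripACore q l with
      | some p => String.mk (pre ++ p)
      | none => line := by
  induction l with
  | nil => intro pre q hline; simp [stripCmakeCommentGoA, stripACore]
  | cons c cs ih =>
      intro pre q hline
      rw [stripCmakeCommentGoA, stripACore]
      by_cases hcut : (c == '#' && !(if c = '"' then !q else q)) = true
      · rw [if_pos hcut, if_pos hcut]
        rw [PySem.List.slice_to line.toList (by positivity)]
        rw [hline]
        simp [List.take_left]
      · rw [if_neg hcut, if_neg hcut]
        have hpre : (pre ++ [c]).length = pre.length + 1 := by simp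
        have := ih (pre ++ [c]) (if c = '"' then !q else q)
          (by rw [hline]; simp)
        rw [hpre] at this
        rw [this]
        cases stripACore (if c = '"' then !q else q) cs <;> simp

/-- One-step unfolding of B's loop. -/
lemma goB_cons (line : String) (res : List Char) (q : Bool) (p : List Char) (ps : List (List Char)) :
    stripCmakeCommentGoB line res q (p :: ps) =
      if q = false then String.mk res
      else stripCmakeCommentGoB line (res ++ '#' :: p)
             (q ^^ (PySem.Chars.count p ['"'] % 2 == 1)) ps := rfl

/-- B's loop, entered with output `res` so far and quote state `q`, equals A's core on the rest. -/
lemma goB_eq_core (line : String) (l : List Char) : ∀ (res : List Char) (q : Bool),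
    (match splitH l with
     | p :: ps => stripCmakeCommentGoB line (res ++ p) (q ^^ (PySem.Chars.count p ['"'] % 2 == 1)) ps
     | [] => line) =
      match stripACore q l with
      | some p => String.mk (res ++ p)
      | none => line := by
  induction l with
  | nil =>
      intro res q
      simp [splitH, stripCmakeCommentGoB, stripACore]
  | cons c cs ih =>
      intro res q
      by_cases hc : c = '#'
      · subst hc
        simp only [splitH, if_pos rfl]
        cases hs : splitH cs with
        | nil => exact absurd hs (splitH_ne_nil cs)
        | cons p ps =>
            show stripCmakeCommentGoB line (res ++ [])
                (q ^^ (PySem.Chars.count ([] : List Char) ['"'] % 2 == 1)) (p :: ps) =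
              match stripACore q ('#' :: cs) with
              | some p => String.mk (res ++ p)
              | none => line
            rw [goB_cons]
            have hq0 : (PySem.Chars.count ([] : List Char) ['"'] % 2 == 1) = false := by decide
            rw [hq0]
            simp only [Bool.xor_false, List.append_nil]
            rw [stripACore]
            simp only [if_neg (by decide : ¬('#' = '"')), beq_self_eq_true, Bool.true_and]
            by_cases hq : q = false
            · subst hq; simp
            · have hq' : q = true := by revert hq; cases q <;> simp
              subst hq'
              rw [if_neg hq]
              have := ih (res ++ ['#']) true
              rw [hs] at this
              simp only [List.append_assoc, List.singleton_append] at this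
              rw [this]
              cases stripACore true cs <;> simp
      · rw [splitH, if_neg hc]
        cases hs : splitH cs with
        | nil => exact absurd hs (splitH_ne_nil cs)
        | cons p ps =>
            show stripCmakeCommentGoB line (res ++ (c :: p))
                (q ^^ (PySem.Chars.count (c :: p) ['"'] % 2 == 1)) ps =
              match stripACore q (c :: cs) with
              | some p => String.mk (res ++ p)
              | none => line
            have hpar : (PySem.Chars.count (c :: p) ['"'] % 2 == 1)
                = ((c = '"' : Bool) ^^ (PySem.Chars.count p ['"'] % 2 == 1)) := by
              rw [count_quote, count_quote, List.count_cons]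
              by_cases hq : c = '"'
              · subst hq
                rcases Nat.mod_two_eq_zero_or_one (List.count '"' p) with h | h <;>
                  simp [Nat.add_mod, h]
              · simp [hq]
            have hcomb : (q ^^ ((c = '"' : Bool) ^^ (PySem.Chars.count p ['"'] % 2 == 1)))
                = ((if c = '"' then !q else q) ^^ (PySem.Chars.count p ['"'] % 2 == 1)) := by
              by_cases hq : c = '"' <;> cases q <;> simp [hq]
            rw [hpar, hcomb, stripACore]
            simp only [if_neg (by simp [hc] : ¬(c == '#' && !(if c = '"' then !q else q)) = true)]
            have := ih (res ++ [c]) (if c = '"' then !q else q)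
            rw [hs] at this
            simp only [List.append_assoc, List.singleton_append] at this
            rw [this]
            cases stripACore (if c = '"' then !q else q) cs <;> simp

-- ===== VERDICT (by name: the statement is the Claim_ definition above) =====
theorem strip_cmake_comment_py_spec : Claim_equal_strip_cmake_comment_py := by
  intro line _
  unfold Spec_strip_cmake_comment_py strip_cmake_comment_py strip_cmake_comment_py_alt
  have hA := goA_eq_core line line.toList [] false rfl
  simp only [List.length_nil, List.nil_append] at hA
  rw [hA, splitOn_hash]
  have hB := goB_eq_core line line.toList [] false
  cases h : splitH line.toList with
  | nil => exact absurd h (splitH_ne_nil line.toList)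
  | cons p ps =>
      rw [h] at hB
      simp only [List.nil_append, Bool.false_xor] at hB
      exact hB.symm
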